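-- pv_equiv track=rewrite | github.com/JeremyBrightbill/Advent-of-Code | 2020/day_13.py | find_next_time
-- ===== SOURCE A (Python) =====
-- def find_next_time(increase_by: int, target_bus: int, offset: int, fixed: bool) -> int:
--     """increase_by is either 1st bus's period OR period when several
--     previous buses repeat. target_bus is the period of target bus. offset
--     is the time the target bus must differ from the previous. If fixed=True,
--     returns the time of the initial bus, not the target bus"""
--
--     start_time: int = increase_by
--
--     while True:
--
--         time_next: int = start_time + offset
--         if time_next % target_bus == 0:
--             if fixed:
--                 return start_time
--             else:
--                 return time_next
--         else:
--             start_time += increase_by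
-- ===== SOURCE B (Python) =====
-- def find_next_time(increase_by: int, target_bus: int, offset: int, fixed: bool) -> int:
--     """Same task solved as a linear congruence: find the least k >= 1 with
--     (k*increase_by + offset) % target_bus == 0 via extended Euclid, instead
--     of stepping through multiples one by one."""
--     m = abs(target_bus)
--     old_r, r = increase_by, m
--     old_s, s = 1, 0
--     while r:
--         q = old_r // r
--         old_r, r = r, old_r - q * r
--         old_s, s = s, old_s - q * s
--     g = old_r                      # gcd(increase_by, target_bus) > 0 (target_bus != 0)
--     mg = m // g
--     k = ((-offset // g) * old_s) % mg
--     if k == 0: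
--         k = mg
--     start_time = k * increase_by
--     return start_time if fixed else start_time + offset
-- ===== Notes on version B (the rewrite author's own statement) =====
-- stated objective: faster
-- what changed: A steps through multiples of increase_by one at a time until one aligns; B solves the linear congruence k*increase_by + offset ≡ 0 (mod target_bus) directly with a hand-written extended Euclid and takes the least k >= 1, with no search loop.
import Mathlib
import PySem

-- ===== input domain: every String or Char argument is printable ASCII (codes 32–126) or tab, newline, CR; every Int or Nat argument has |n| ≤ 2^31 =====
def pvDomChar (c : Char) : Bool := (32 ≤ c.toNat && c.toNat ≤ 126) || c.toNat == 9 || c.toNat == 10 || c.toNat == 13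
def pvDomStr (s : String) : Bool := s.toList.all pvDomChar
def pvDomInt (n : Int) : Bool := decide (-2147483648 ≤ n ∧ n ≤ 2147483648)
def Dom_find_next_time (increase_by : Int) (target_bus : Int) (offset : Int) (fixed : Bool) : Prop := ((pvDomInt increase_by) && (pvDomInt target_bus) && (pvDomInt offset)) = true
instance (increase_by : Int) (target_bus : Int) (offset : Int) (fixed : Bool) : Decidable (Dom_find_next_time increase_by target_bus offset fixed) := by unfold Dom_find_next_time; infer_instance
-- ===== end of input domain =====

-- B replaces A's one-multiple-at-a-time search with a single extended-Euclid solve of the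
-- linear congruence, so it is asymptotically faster (O(log) vs O(answer)); return value only.

-- ===== PORT A =====
-- A's 'while True' loop; the Python loop terminates on every input admitted by
-- Pre_find_next_time within target_bus.natAbs iterations, so this fuel is exact there.
def fntLoop (increase_by target_bus offset : Int) (fixed : Bool) : Nat → Int → Int
  | 0, _ => 0
  | fuel+1, start_time =>
    let time_next := start_time + offset
    if PySem.Int.mod time_next target_bus = 0 then
      (if fixed then start_time else time_next)
    else fntLoop increase_by target_bus offset fixed fuel (start_time + increase_by)

def find_next_time (increase_by : Int) (target_bus : Int) (offset : Int) (fixed : Bool) : Int :=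
  fntLoop increase_by target_bus offset fixed (target_bus.natAbs + 1) increase_by

-- ===== PORT B =====
-- B's hand-written extended-Euclid 'while r:' loop; r = |target_bus| at entry and strictly
-- decreases, so fuel target_bus.natAbs + 1 is exact.
def egcdLoop : Nat → Int → Int → Int → Int → Int × Int
  | 0, old_r, _, old_s, _ => (old_r, old_s)
  | fuel+1, old_r, r, old_s, s =>
    if r = 0 then (old_r, old_s)
    else
      let q := PySem.Int.floordiv old_r r
      egcdLoop fuel r (old_r - q * r) s (old_s - q * s)

def find_next_time_alt (increase_by : Int) (target_bus : Int) (offset : Int) (fixed : Bool) : Int :=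
  let m : Int := |target_bus|
  let gs := egcdLoop (target_bus.natAbs + 1) increase_by m 1 0
  let g := gs.1
  let mg := PySem.Int.floordiv m g
  let k0 := PySem.Int.mod (PySem.Int.floordiv (-offset) g * gs.2) mg
  let k := if k0 = 0 then mg else k0
  let start_time := k * increase_by
  if fixed then start_time else start_time + offset

-- ===== PRECONDITION & SPEC =====
-- Pre_ is exactly where the Python A returns: target_bus = 0 raises ZeroDivisionError, and
-- when gcd(increase_by, target_bus) does not divide offset the congruence has no solution
-- and A loops forever.
def Pre_find_next_time (increase_by : Int) (target_bus : Int) (offset : Int) (fixed : Bool) : Prop :=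
  target_bus ≠ 0 ∧ (Int.gcd increase_by target_bus : Int) ∣ offset
instance (increase_by : Int) (target_bus : Int) (offset : Int) (fixed : Bool) : Decidable (Pre_find_next_time increase_by target_bus offset fixed) := by unfold Pre_find_next_time; infer_instance

def pvWitness_find_next_time : Int × Int × Int × Bool := (7, 13, 3, false)

def Spec_find_next_time (increase_by : Int) (target_bus : Int) (offset : Int) (fixed : Bool) (out : Int) : Prop := out = find_next_time_alt increase_by target_bus offset fixed
instance (increase_by : Int) (target_bus : Int) (offset : Int) (fixed : Bool) (out : Int) : Decidable (Spec_find_next_time increase_by target_bus offset fixed out) := by unfold Spec_find_next_time; infer_instance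

-- ===== CLAIM (what is proved, stated in full; the proofs are below) =====
def Claim_equal_find_next_time : Prop := ∀ (increase_by : Int) (target_bus : Int) (offset : Int) (fixed : Bool), Dom_find_next_time increase_by target_bus offset fixed → Pre_find_next_time increase_by target_bus offset fixed → Spec_find_next_time increase_by target_bus offset fixed (find_next_time increase_by target_bus offset fixed)

-- ===== LEMMAS AND PROOFS =====

-- Euclid's step preserves the gcd
theorem gcd_emod (a r : Int) (hr : r ≠ 0) : Int.gcd r (a % r) = Int.gcd a r := by
  apply Nat.dvd_antisymm
  · apply Int.dvd_gcd
    · have h1 : (↑(Int.gcd r (a % r)) : Int) ∣ r := Int.gcd_dvd_left r (a % r)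
      have h2 : (↑(Int.gcd r (a % r)) : Int) ∣ a % r := Int.gcd_dvd_right r (a % r)
      have h3 := dvd_add (Dvd.dvd.mul_right h1 (a / r)) h2
      have heq : r * (a / r) + a % r = a := Int.ediv_add_emod a r
      rwa [heq] at h3
    · exact Int.gcd_dvd_left r (a % r)
  · apply Int.dvd_gcd
    · exact Int.gcd_dvd_right a r
    · have h1 : (↑(Int.gcd a r) : Int) ∣ a := Int.gcd_dvd_left a r
      have h2 : (↑(Int.gcd a r) : Int) ∣ r := Int.gcd_dvd_right a r
      have h3 := dvd_sub h1 (Dvd.dvd.mul_right h2 (a / r))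
      have heq : a - r * (a / r) = a % r := (Int.emod_def a r).symm
      rwa [heq] at h3

-- egcdLoop computes gcd (first component)
theorem egcdLoop_gcd (fuel : Nat) : ∀ (a r sa sr : Int), 0 ≤ r → r.natAbs < fuel →
    (r = 0 → 0 ≤ a) → (egcdLoop fuel a r sa sr).1 = Int.gcd a r := by
  induction fuel with
  | zero => intro a r sa sr _ h; omega
  | succ n ih =>
    intro a r sa sr hr hfuel h0
    by_cases hrz : r = 0
    · subst hrz
      have h0' := h0 rfl
      have hred : egcdLoop (n + 1) a 0 sa sr = (a, sa) := by simp [egcdLoop]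
      rw [hred]
      show a = ↑(Int.gcd a 0)
      unfold Int.gcd
      rw [Int.natAbs_zero, Nat.gcd_zero_right]
      omega
    · have hrpos : 0 < r := lt_of_le_of_ne hr (Ne.symm hrz)
      have hq : PySem.Int.floordiv a r = a / r := PySem.Int.floordiv_eq_ediv_of_pos hrpos
      have hmodeq : a - a / r * r = a % r := by
        have := Int.ediv_add_emod a r
        linarith
      have hmnn : 0 ≤ a % r := Int.emod_nonneg a hrz
      have hmlt : a % r < r := Int.emod_lt_of_pos a hrpos
      have hrec := ih r (a % r) sr (sa - a / r * sr) hmnn (by omega)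
        (fun _ => le_of_lt hrpos)
      simp only [egcdLoop, if_neg hrz, hq, hmodeq]
      rw [hrec]
      rw [gcd_emod a r hrz]

-- egcdLoop preserves the linear invariant modulo m
theorem egcdLoop_bezout (fuel : Nat) : ∀ (a r sa sr i m : Int),
    m ∣ (a - sa * i) → m ∣ (r - sr * i) →
    m ∣ ((egcdLoop fuel a r sa sr).1 - (egcdLoop fuel a r sa sr).2 * i) := by
  induction fuel with
  | zero => intro a r sa sr i m h1 _; simpa [egcdLoop] using h1
  | succ n ih =>
    intro a r sa sr i m h1 h2
    by_cases hrz : r = 0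
    · simpa [egcdLoop, hrz] using h1
    · simp only [egcdLoop, if_neg hrz]
      apply ih
      · exact h2
      · have : a - PySem.Int.floordiv a r * r - (sa - PySem.Int.floordiv a r * sr) * i
            = (a - sa * i) - PySem.Int.floordiv a r * (r - sr * i) := by ring
        rw [this]
        exact dvd_sub h1 (Dvd.dvd.mul_left h2 _)

-- A's loop finds (if fixed then k*i else k*i+off) for the least solution k ≥ current index
theorem fntLoop_finds (i t off : Int) (fixed : Bool) :
    ∀ (fuel : Nat) (j kB : Int), j ≤ kB → (kB - j).toNat < fuel →
    (∀ x, j ≤ x → x < kB → PySem.Int.mod (x * i + off) t ≠ 0) →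
    PySem.Int.mod (kB * i + off) t = 0 →
    fntLoop i t off fixed fuel (j * i) = (if fixed then kB * i else kB * i + off) := by
  intro fuel
  induction fuel with
  | zero => intro j kB _ h; omega
  | succ n ih =>
    intro j kB hjk hfuel hmin hkB
    by_cases hp : PySem.Int.mod (j * i + off) t = 0
    · have hjeq : j = kB := by
        by_contra hne
        exact hmin j le_rfl (lt_of_le_of_ne hjk hne) hp
      subst hjeq
      simp [fntLoop, hp]
    · have hjlt : j < kB := by
        rcases lt_or_eq_of_le hjk with h | h
        · exact h
        · exact absurd (h ▸ hkB) hp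
      have hstep : j * i + i = (j + 1) * i := by ring
      simp only [fntLoop, if_neg hp]
      rw [hstep]
      exact ih (j + 1) kB (by omega) (by omega)
        (fun x hx1 hx2 => hmin x (by omega) hx2) hkB

-- a multiple of mg with absolute value below mg is zero
theorem dvd_small_eq_zero (mg x : Int) (hmg : 0 < mg) (h1 : -mg < x) (h2 : x < mg)
    (hdvd : mg ∣ x) : x = 0 := by
  rcases hdvd with ⟨c, rfl⟩
  rcases lt_trichotomy c 0 with hc | hc | hc
  · nlinarith
  · simp [hc]
  · nlinarith

-- ===== VERDICT (by name: the statement is the Claim_ definition above) =====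
theorem find_next_time_spec : Claim_equal_find_next_time := by
  intro i t off fixed _ hpre
  obtain ⟨ht, hdvd⟩ := hpre
  unfold Spec_find_next_time
  have hm : (0:Int) < |t| := abs_pos.mpr ht
  set m : Int := |t| with hmdef
  -- the extended-Euclid result
  set gs := egcdLoop (t.natAbs + 1) i m 1 0 with hgs
  have hg_gcd : gs.1 = Int.gcd i m := by
    apply egcdLoop_gcd
    · omega
    · have : m.natAbs = t.natAbs := by rw [hmdef]; exact Int.natAbs_abs t
      omega
    · intro h; omega
  have hgcd_eq : Int.gcd i m = Int.gcd i t := by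
    rw [hmdef]; unfold Int.gcd; rw [Int.natAbs_abs]
  set g := gs.1 with hgdef
  have hg_pos : 0 < g := by
    rw [hg_gcd]
    exact_mod_cast Nat.pos_of_ne_zero (fun h => ht (by
      have := Int.gcd_eq_zero_iff.mp (hgcd_eq ▸ h)
      exact this.2))
  have hg_dvd_i : g ∣ i := hg_gcd ▸ Int.gcd_dvd_left i m
  have hg_dvd_m : g ∣ m := hg_gcd ▸ Int.gcd_dvd_right i m
  have hg_dvd_off : g ∣ off := by rw [hg_gcd, hgcd_eq]; exact hdvd
  have hbez : m ∣ (g - gs.2 * i) := by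
    have := egcdLoop_bezout (t.natAbs + 1) i m 1 0 i m (by simp) (by simp)
    exact this
  set S := gs.2 with hSdef
  -- quotients
  obtain ⟨i', hi'⟩ := hg_dvd_i
  obtain ⟨mg, hmg⟩ := hg_dvd_m
  obtain ⟨off', hoff'⟩ := hg_dvd_off
  have hmg_pos : 0 < mg := by nlinarith
  have hfd_m : PySem.Int.floordiv m g = mg := by
    rw [PySem.Int.floordiv_eq_ediv_of_pos hg_pos, hmg, Int.mul_ediv_cancel_left _ (ne_of_gt hg_pos)]
  have hfd_off : PySem.Int.floordiv (-off) g = -off' := by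
    rw [PySem.Int.floordiv_eq_ediv_of_pos hg_pos, hoff', ← Int.mul_neg,
      Int.mul_ediv_cancel_left _ (ne_of_gt hg_pos)]
  -- key congruence: S * i' ≡ 1 (mod mg)
  have hkey : mg ∣ (1 - S * i') := by
    have h1 : g * mg ∣ g * (1 - S * i') := by
      rw [← hmg]
      have : g * (1 - S * i') = g - S * i := by rw [hi']; ring
      rw [this]; exact hbez
    exact (mul_dvd_mul_iff_left (ne_of_gt hg_pos)).mp h1
  -- k0
  set k0 := PySem.Int.mod (-off' * S) mg with hk0def
  have hk0_emod : k0 = (-off' * S) % mg := by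
    rw [hk0def, PySem.Int.mod_eq_emod_of_pos hmg_pos]
  have hk0_nonneg : 0 ≤ k0 := by rw [hk0_emod]; exact Int.emod_nonneg _ (ne_of_gt hmg_pos)
  have hk0_lt : k0 < mg := by rw [hk0_emod]; exact Int.emod_lt_of_pos _ hmg_pos
  have hk0_cong : mg ∣ (k0 - (-off' * S)) := by
    refine ⟨-((-off' * S) / mg), ?_⟩
    rw [hk0_emod, Int.emod_def]; ring
  set kB : Int := if k0 = 0 then mg else k0 with hkBdef
  have hkB_lb : 1 ≤ kB := by rw [hkBdef]; split_ifs <;> omega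
  have hkB_ub : kB ≤ mg := by rw [hkBdef]; split_ifs <;> omega
  have hkB_cong : mg ∣ (kB - k0) := by
    rw [hkBdef]; split_ifs with h
    · simp [h]
    · simp
  -- characterization of solutions
  have hchar : ∀ k : Int, PySem.Int.mod (k * i + off) t = 0 ↔ mg ∣ (k - k0) := by
    intro k
    rw [PySem.Int.mod_eq_zero_iff_dvd]
    have habs : t ∣ (k * i + off) ↔ m ∣ (k * i + off) := by
      rw [hmdef]; exact (abs_dvd t _).symm
    rw [habs]
    have hfact : k * i + off = g * (k * i' + off') := by rw [hi', hoff']; ring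
    rw [hfact, hmg, mul_dvd_mul_iff_left (ne_of_gt hg_pos)]
    constructor
    · intro h
      -- mg ∣ k*i'+off' → mg ∣ k + off'*S → mg ∣ k - k0
      have h1 : mg ∣ S * (k * i' + off') := Dvd.dvd.mul_left h S
      have h2 : mg ∣ (k + off' * S) := by
        have : k + off' * S = S * (k * i' + off') + k * (1 - S * i') := by ring
        rw [this]; exact dvd_add h1 (Dvd.dvd.mul_left hkey k)
      have : k - k0 = (k + off' * S) - (k0 - (-off' * S)) := by ring
      rw [this]; exact dvd_sub h2 hk0_cong
    · intro h
      have h2 : mg ∣ (k + off' * S) := by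
        have : k + off' * S = (k - k0) + (k0 - (-off' * S)) := by ring
        rw [this]; exact dvd_add h hk0_cong
      have : k * i' + off' = i' * (k + off' * S) + off' * (1 - i' * S) := by ring
      rw [this]
      refine dvd_add (Dvd.dvd.mul_left h2 i') (Dvd.dvd.mul_left ?_ off')
      have : (1 : Int) - i' * S = 1 - S * i' := by ring
      rw [this]; exact hkey
  -- kB is a solution
  have hPkB : PySem.Int.mod (kB * i + off) t = 0 := (hchar kB).mpr hkB_cong
  -- kB is minimal among k ≥ 1
  have hmin : ∀ x : Int, 1 ≤ x → x < kB → PySem.Int.mod (x * i + off) t ≠ 0 := by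
    intro x hx1 hx2 hP
    have hx_cong := (hchar x).mp hP
    have hxk : x - k0 = 0 := by
      apply dvd_small_eq_zero mg _ hmg_pos _ _ hx_cong
      · omega
      · omega
    rw [hkBdef] at hx2
    split_ifs at hx2 with h <;> omega
  -- mg ≤ m, so fuel suffices
  have hmg_le_m : mg ≤ m := by nlinarith
  have hloop := fntLoop_finds i t off fixed (t.natAbs + 1) 1 kB hkB_lb
    (by have : m = (t.natAbs : Int) := by rw [hmdef, Int.abs_eq_natAbs]
        omega)
    (fun x hx1 hx2 => hmin x hx1 hx2) hPkB
  rw [one_mul] at hloop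
  have halt : find_next_time_alt i t off fixed = (if fixed then kB * i else kB * i + off) := by
    simp only [find_next_time_alt]
    rw [← hmdef, ← hgs, ← hgdef, ← hSdef, hfd_off, hfd_m, ← hk0def, ← hkBdef]
  rw [halt]
  show fntLoop i t off fixed (t.natAbs + 1) i = _
  exact hloop
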